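-- pv_equiv track=rewrite | github.com/xhinini/agent-based-issue-resolution | utils/taxonomy_classifier.py | _distributions_from_rows
-- ===== SOURCE A (Python) =====
-- from typing import Dict, List, Optional, Tuple
--
-- def _distributions_from_rows(rows: List[Dict[str, str]]) -> Tuple[Dict[int, int], Dict[str, Dict[int, int]]]:
--     overall: Dict[int, int] = {}
--     by_model: Dict[str, Dict[int, int]] = {}
--     for r in rows:
--         cls = (r.get('class') or '').strip()
--         if not cls.isdigit():
--             continue
--         label = int(cls)
--         model_name = r.get('model_name', '')
--         overall[label] = overall.get(label, 0) + 1
--         by_model.setdefault(model_name, {})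
--         by_model[model_name][label] = by_model[model_name].get(label, 0) + 1
--     return overall, by_model
-- ===== SOURCE B (Python) =====
-- def _distributions_from_rows(rows):
--     # gather: parse valid rows into (model_name, label) pairs, in order
--     pairs = []
--     for r in rows:
--         cls = (r.get('class') or '').strip()
--         if cls.isdigit():
--             pairs.append((r.get('model_name', ''), int(cls)))
--     # reduce 1: overall label counts
--     overall = {}
--     for _, label in pairs:
--         overall[label] = overall.get(label, 0) + 1
--     # reduce 2: per-model label counts
--     by_model = {}
--     for model, label in pairs:
--         d = by_model.setdefault(model, {})
--         d[label] = d.get(label, 0) + 1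
--     return overall, by_model
-- ===== Notes on version B (the rewrite author's own statement) =====
-- stated objective: alternative
-- what changed: A's single loop that parses each row and updates both dicts interleaved is split into one gather pass producing (model_name, label) pairs for valid rows, followed by two independent reduce passes building overall and by_model.
import Mathlib
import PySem

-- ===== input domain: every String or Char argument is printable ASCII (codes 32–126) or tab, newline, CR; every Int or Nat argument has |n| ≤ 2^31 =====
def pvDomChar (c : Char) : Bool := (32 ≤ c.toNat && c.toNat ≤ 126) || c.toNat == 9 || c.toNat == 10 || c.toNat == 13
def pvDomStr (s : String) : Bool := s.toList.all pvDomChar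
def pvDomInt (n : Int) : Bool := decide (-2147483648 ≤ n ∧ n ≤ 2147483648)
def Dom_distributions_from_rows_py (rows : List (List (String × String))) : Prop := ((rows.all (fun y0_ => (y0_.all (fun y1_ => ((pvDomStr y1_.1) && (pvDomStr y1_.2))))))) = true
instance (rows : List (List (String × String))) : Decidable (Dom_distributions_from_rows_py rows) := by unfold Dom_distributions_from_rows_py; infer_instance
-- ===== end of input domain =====

-- B changes the decomposition: one gather pass producing (model, label) pairs, then two
-- separate reduce passes (overall, by_model) instead of A's single interleaved loop (objective: alternative).

-- ===== PORT A =====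
-- A's loop body: per row, parse 'class' and update both dicts in one step.
def pvStepA (st : PySem.Dict Int Int × PySem.Dict String (PySem.Dict Int Int))
    (r : List (String × String)) : PySem.Dict Int Int × PySem.Dict String (PySem.Dict Int Int) :=
  let d := PySem.Dict.ofList r
  let cls := PySem.Str.strip ((PySem.Dict.get? d "class").getD "")
  if PySem.Str.strIsdigit cls then
    let label := (PySem.Int.ofStr? cls).getD 0
    let mn := (PySem.Dict.get? d "model_name").getD ""
    let overall := st.1.insert label (st.1.getD label 0 + 1)
    let bm := st.2.setdefault mn PySem.Dict.empty
    let inner := bm.getD mn PySem.Dict.empty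
    (overall, bm.insert mn (inner.insert label (inner.getD label 0 + 1)))
  else st

def distributions_from_rows_py (rows : List (List (String × String))) : (List (Int × Int)) × (List (String × List (Int × Int))) :=
  let st := rows.foldl pvStepA (PySem.Dict.empty, PySem.Dict.empty)
  (st.1.items, st.2.items.map (fun p => (p.1, p.2.items)))

-- ===== PORT B =====
-- gather pass: parse a row into (model_name, label) if its 'class' is a digit string
def pvExtract (r : List (String × String)) : Option (String × Int) :=
  let d := PySem.Dict.ofList r
  let cls := PySem.Str.strip ((PySem.Dict.get? d "class").getD "")
  if PySem.Str.strIsdigit cls then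
    some ((PySem.Dict.get? d "model_name").getD "", (PySem.Int.ofStr? cls).getD 0)
  else none

-- reduce 1 body: count one label
def pvStepO (o : PySem.Dict Int Int) (p : String × Int) : PySem.Dict Int Int :=
  o.insert p.2 (o.getD p.2 0 + 1)

-- reduce 2 body: count one label under its model
def pvStepM (b : PySem.Dict String (PySem.Dict Int Int)) (p : String × Int) :
    PySem.Dict String (PySem.Dict Int Int) :=
  let b' := b.setdefault p.1 PySem.Dict.empty
  let inner := b'.getD p.1 PySem.Dict.empty
  b'.insert p.1 (inner.insert p.2 (inner.getD p.2 0 + 1))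

def distributions_from_rows_py_alt (rows : List (List (String × String))) : (List (Int × Int)) × (List (String × List (Int × Int))) :=
  let pairs := rows.filterMap pvExtract
  ((pairs.foldl pvStepO PySem.Dict.empty).items,
   (pairs.foldl pvStepM PySem.Dict.empty).items.map (fun p => (p.1, p.2.items)))

-- ===== PRECONDITION & SPEC =====
def Spec_distributions_from_rows_py (rows : List (List (String × String))) (out : (List (Int × Int)) × (List (String × List (Int × Int)))) : Prop := out = distributions_from_rows_py_alt rows
instance (rows : List (List (String × String))) (out : (List (Int × Int)) × (List (String × List (Int × Int)))) : Decidable (Spec_distributions_from_rows_py rows out) := by unfold Spec_distributions_from_rows_py; infer_instance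

-- ===== CLAIM (what is proved, stated in full; the proofs are below) =====
def Claim_equal_distributions_from_rows_py : Prop := ∀ (rows : List (List (String × String))), Dom_distributions_from_rows_py rows → Spec_distributions_from_rows_py rows (distributions_from_rows_py rows)

-- ===== LEMMAS AND PROOFS =====

-- one step of A = (at most) one step of each of B's reduces, driven by pvExtract
theorem pvStepA_eq (st : PySem.Dict Int Int × PySem.Dict String (PySem.Dict Int Int))
    (r : List (String × String)) :
    pvStepA st r = match pvExtract r with
      | none => st
      | some p => (pvStepO st.1 p, pvStepM st.2 p) := by
  unfold pvStepA pvExtract pvStepO pvStepM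
  dsimp only
  by_cases h : PySem.Str.strIsdigit (PySem.Str.strip (((PySem.Dict.ofList r).get? "class").getD "")) = true
  · rw [if_pos h, if_pos h]
  · rw [if_neg h, if_neg h]

-- A's interleaved fold equals the pair of B's two folds over the gathered pairs.
theorem pv_fold_split (rows : List (List (String × String)))
    (o : PySem.Dict Int Int) (b : PySem.Dict String (PySem.Dict Int Int)) :
    rows.foldl pvStepA (o, b)
    = ((rows.filterMap pvExtract).foldl pvStepO o,
       (rows.filterMap pvExtract).foldl pvStepM b) := by
  induction rows generalizing o b with
  | nil => rfl
  | cons r rest ih =>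
    simp only [List.foldl_cons, List.filterMap_cons, pvStepA_eq (o, b) r]
    cases h : pvExtract r with
    | none => exact ih o b
    | some p => simp only [List.foldl_cons]; exact ih _ _

-- ===== VERDICT (by name: the statement is the Claim_ definition above) =====
theorem distributions_from_rows_py_spec : Claim_equal_distributions_from_rows_py := by
  intro rows _
  unfold Spec_distributions_from_rows_py distributions_from_rows_py distributions_from_rows_py_alt
  rw [pv_fold_split]
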